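-- pv_equiv track=rewrite | github.com/juandiegor/advent-of-code-2019 | Day4.py | no_more_than_two_consecutive
-- ===== SOURCE A (Python) =====
-- def no_more_than_two_consecutive(number, consec):
--     number = str(number)
--     pos = 0
--     for digit in number:
--         if pos < len(number) - 2 and number[pos+1] == digit and number[pos+2] == digit:
--             return False
--         pos += 1
--     return True
-- ===== SOURCE B (Python) =====
-- def no_more_than_two_consecutive(number, consec):
--     # run-length decomposition: peel off each maximal run of equal chars,
--     # fail as soon as a run has length >= 3
--     s = str(number)
--     return _runs_ok(list(s))
--
-- def _runs_ok(chars):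
--     if not chars:
--         return True
--     c = chars[0]
--     rest = chars[1:]
--     run = 1
--     while rest and rest[0] == c:
--         run += 1
--         rest = rest[1:]
--     return run < 3 and _runs_ok(rest)
-- ===== Notes on version B (the rewrite author's own statement) =====
-- stated objective: alternative
-- what changed: B replaces A's sliding triple-window lookaheads (s[pos+1], s[pos+2] at every position) with a run-length decomposition: it peels off each maximal run of equal characters and fails as soon as a run has length >= 3.
import Mathlib
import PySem

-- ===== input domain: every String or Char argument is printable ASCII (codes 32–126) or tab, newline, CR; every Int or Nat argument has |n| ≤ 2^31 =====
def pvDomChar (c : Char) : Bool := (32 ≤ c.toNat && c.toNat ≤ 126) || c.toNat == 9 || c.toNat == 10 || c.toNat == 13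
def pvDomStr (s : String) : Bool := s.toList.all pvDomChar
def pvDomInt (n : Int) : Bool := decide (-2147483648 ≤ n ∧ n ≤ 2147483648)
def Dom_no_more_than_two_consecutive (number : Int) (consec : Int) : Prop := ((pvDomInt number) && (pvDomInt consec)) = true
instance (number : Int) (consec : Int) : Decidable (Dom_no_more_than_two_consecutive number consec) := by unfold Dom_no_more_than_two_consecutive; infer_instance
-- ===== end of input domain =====

-- B replaces A's sliding triple-window lookaheads with a run-length decomposition
-- (peel maximal runs of equal chars, fail when a run reaches length 3); alternative, same cost.

-- ===== PORT A =====
-- the 'for digit in number' loop with the running counter pos; early 'return False' = returning false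
def aLoop (s : List Char) : List Char → Int → Bool
  | [], _ => true
  | digit :: tl, pos =>
    if pos < (s.length : Int) - 2 ∧ PySem.List.pyGet? s (pos + 1) = some digit ∧
        PySem.List.pyGet? s (pos + 2) = some digit then
      false
    else
      aLoop s tl (pos + 1)

def no_more_than_two_consecutive (number : Int) (consec : Int) : Bool :=
  let s := (PySem.Int.toStr number).toList
  aLoop s s 0

-- ===== PORT B =====
-- the 'while rest and rest[0] == c' loop of _runs_ok
def bConsume (c : Char) : Nat → List Char → Nat × List Char
  | run, r :: tlr => if r = c then bConsume c (run + 1) tlr else (run, r :: tlr)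
  | run, [] => (run, [])

theorem bConsume_len_le (c : Char) : ∀ (run : Nat) (l : List Char),
    (bConsume c run l).2.length ≤ l.length := by
  intro run l
  induction l generalizing run with
  | nil => simp [bConsume]
  | cons r tlr ih =>
    by_cases h : r = c
    · simpa [bConsume, h] using Nat.le_trans (ih (run + 1)) (Nat.le_succ _)
    · simp [bConsume, h]

-- _runs_ok
def runsOk : List Char → Bool
  | [] => true
  | c :: tl =>
    let p := bConsume c 1 tl
    p.1 < 3 && runsOk p.2
termination_by l => l.length
decreasing_by
  simpa using Nat.lt_succ_of_le (bConsume_len_le c 1 tl)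

def no_more_than_two_consecutive_alt (number : Int) (consec : Int) : Bool :=
  let s := (PySem.Int.toStr number).toList
  runsOk s

-- ===== PRECONDITION & SPEC =====
def Spec_no_more_than_two_consecutive (number : Int) (consec : Int) (out : Bool) : Prop := out = no_more_than_two_consecutive_alt number consec
instance (number : Int) (consec : Int) (out : Bool) : Decidable (Spec_no_more_than_two_consecutive number consec out) := by unfold Spec_no_more_than_two_consecutive; infer_instance

-- ===== CLAIM (what is proved, stated in full; the proofs are below) =====
def Claim_equal_no_more_than_two_consecutive : Prop := ∀ (number : Int) (consec : Int), Dom_no_more_than_two_consecutive number consec → Spec_no_more_than_two_consecutive number consec (no_more_than_two_consecutive number consec)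

-- ===== LEMMAS AND PROOFS =====

-- common reference: "some position starts three equal consecutive chars"
def hasTriple : List Char → Bool
  | a :: b :: c :: tl => (a = b ∧ b = c : Prop) || hasTriple (b :: c :: tl)
  | _ => false

theorem hasTriple_cons_ne (b c : Char) (t : List Char) (h : ¬ b = c) :
    hasTriple (c :: b :: t) = hasTriple (b :: t) := by
  cases t with
  | nil => simp [hasTriple]
  | cons x r => simp [hasTriple, show c ≠ b from fun hcb => h hcb.symm]

theorem aLoop_eq (s : List Char) : ∀ (tl : List Char) (p : Nat), s.drop p = tl →
    aLoop s tl (p : Int) = !hasTriple tl := by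
  intro tl
  induction tl with
  | nil => intro p _; simp [aLoop, hasTriple]
  | cons d rest ih =>
    intro p hdrop
    have hp : p < s.length := by
      by_contra h
      simp [List.drop_eq_nil_of_le (Nat.le_of_not_lt h)] at hdrop
    have hlen : s.length = p + 1 + rest.length := by
      have := congrArg List.length hdrop
      simp at this
      omega
    have hgk : ∀ k : Nat, s[p + k]? = (d :: rest)[k]? := by
      intro k
      rw [← hdrop, List.getElem?_drop]
    have hdrop' : s.drop (p + 1) = rest := by
      have h1 : s.drop (p + 1) = (s.drop p).drop 1 := by
        rw [List.drop_drop]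
      rw [h1, hdrop]
      simp
    have ih' := ih (p + 1) hdrop'
    have hcast : ((p : Int) + 1) = ((p + 1 : Nat) : Int) := by push_cast; ring
    have hcast2 : ((p : Int) + 2) = ((p + 2 : Nat) : Int) := by push_cast; ring
    have hg1 : PySem.List.pyGet? s ((p : Int) + 1) = rest[0]? := by
      rw [hcast, PySem.List.pyGet?_natCast, hgk 1]
      simp
    have hg2 : PySem.List.pyGet? s ((p : Int) + 2) = rest[1]? := by
      rw [hcast2, PySem.List.pyGet?_natCast, hgk 2]
      simp
    have step : aLoop s (d :: rest) (p : Int) =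
        if ((p : Int) < (s.length : Int) - 2 ∧ PySem.List.pyGet? s ((p : Int) + 1) = some d ∧
            PySem.List.pyGet? s ((p : Int) + 2) = some d) then false
        else aLoop s rest ((p : Int) + 1) := rfl
    cases rest with
    | nil =>
      have hc : ¬ ((p : Int) < (s.length : Int) - 2 ∧
          PySem.List.pyGet? s ((p : Int) + 1) = some d ∧
          PySem.List.pyGet? s ((p : Int) + 2) = some d) := by
        rintro ⟨h1, -, -⟩
        simp [hlen] at h1
        omega
      rw [step, if_neg hc, hcast, ih']
      simp [hasTriple]
    | cons b rest2 =>
      cases rest2 with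
      | nil =>
        have hc : ¬ ((p : Int) < (s.length : Int) - 2 ∧
            PySem.List.pyGet? s ((p : Int) + 1) = some d ∧
            PySem.List.pyGet? s ((p : Int) + 2) = some d) := by
          rintro ⟨h1, -, -⟩
          simp [hlen] at h1
          omega
        rw [step, if_neg hc, hcast, ih']
        simp [hasTriple]
      | cons c rest3 =>
        have hcond : ((p : Int) < (s.length : Int) - 2 ∧
            PySem.List.pyGet? s ((p : Int) + 1) = some d ∧
            PySem.List.pyGet? s ((p : Int) + 2) = some d) ↔ (b = d ∧ c = d) := by
          rw [hg1, hg2]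
          simp [hlen]
          intro _ _
          omega
        by_cases hbc : b = d ∧ c = d
        · rw [step, if_pos (hcond.mpr hbc)]
          obtain ⟨h1, h2⟩ := hbc
          simp [hasTriple, h1, h2]
        · rw [step, if_neg (fun h => hbc (hcond.mp h)), hcast, ih']
          have hfront : ¬ (d = b ∧ b = c) := by
            rintro ⟨h1, h2⟩
            exact hbc ⟨h1.symm, (h1.trans h2).symm⟩
          simp [hasTriple, hfront]

theorem bConsume_fst_ge (c : Char) : ∀ (l : List Char) (run : Nat),
    run ≤ (bConsume c run l).1 := by
  intro l
  induction l with
  | nil => intro run; simp [bConsume]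
  | cons r tlr ih =>
    intro run
    by_cases h : r = c
    · simpa [bConsume, h] using Nat.le_trans (Nat.le_succ run) (ih (run + 1))
    · simp [bConsume, h]

theorem runsOk_eq : ∀ (l : List Char), runsOk l = !hasTriple l := by
  intro l
  induction l using runsOk.induct with
  | case1 => simp [runsOk, hasTriple]
  | case2 c tl p ih0 =>
    have ih : runsOk (bConsume c 1 tl).2 = !hasTriple (bConsume c 1 tl).2 := ih0
    rw [runsOk]
    cases tl with
    | nil => simp [bConsume, runsOk, hasTriple]
    | cons b tl2 =>
      by_cases hb : b = c
      · subst hb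
        cases tl2 with
        | nil => simp [bConsume, runsOk, hasTriple]
        | cons d tl3 =>
          by_cases hd : d = b
          · subst hd
            have h3 : 3 ≤ (bConsume d 1 (d :: d :: tl3)).1 := by
              have e : bConsume d 1 (d :: d :: tl3) = bConsume d 3 tl3 := by
                simp [bConsume]
              rw [e]
              exact bConsume_fst_ge d tl3 3
            simp only [hasTriple]
            simp
            intro h'
            omega
          · have e : bConsume b 1 (b :: d :: tl3) = (2, d :: tl3) := by
              simp [bConsume, hd]
            rw [e] at ih
            simp only [e]
            have hh : hasTriple (b :: b :: d :: tl3) = hasTriple (d :: tl3) := by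
              rw [show hasTriple (b :: b :: d :: tl3) =
                  (((b = b ∧ b = d : Prop) : Bool) || hasTriple (b :: d :: tl3)) from rfl,
                hasTriple_cons_ne d b tl3 hd]
              simp [show b ≠ d from fun h => hd h.symm]
            rw [hh, ← ih]
            simp
      · have e : bConsume c 1 (b :: tl2) = (1, b :: tl2) := by
          simp [bConsume, hb]
        rw [e] at ih
        simp only [e]
        rw [hasTriple_cons_ne b c tl2 hb, ← ih]
        simp

-- ===== VERDICT (by name: the statement is the Claim_ definition above) =====
theorem no_more_than_two_consecutive_spec : Claim_equal_no_more_than_two_consecutive := by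
  intro number consec _
  unfold Spec_no_more_than_two_consecutive no_more_than_two_consecutive no_more_than_two_consecutive_alt
  show aLoop ((PySem.Int.toStr number).toList) ((PySem.Int.toStr number).toList) 0 =
    runsOk ((PySem.Int.toStr number).toList)
  have h := aLoop_eq ((PySem.Int.toStr number).toList) ((PySem.Int.toStr number).toList) 0 (by simp)
  push_cast at h
  rw [h, runsOk_eq]
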